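-- pv_equiv track=rewrite | github.com/s4b4ch4br4v4/Pygame-Hexagonal-Cellular-Automata | simulation_utils.py | precompute_edges
-- ===== SOURCE A (Python) =====
-- def precompute_edges(grid_radius):
--     edges = set()
--     grid_range = [-grid_radius, grid_radius]
--     for q in range(-grid_radius, grid_radius + 1):
--         for r in range(-grid_radius, grid_radius + 1):
--             if q in grid_range or r in grid_range or -q - r in grid_range:
--                 edges.add((q, r))
--     return edges
-- ===== SOURCE B (Python) =====
-- def precompute_edges(grid_radius):
--     # Enumerate the six boundary lines directly: full rows q = +-R,
--     # and for interior q just the cells on r = +-R and q + r = +-R.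
--     R = grid_radius
--     edges = set()
--     for q in range(-R, R + 1):
--         if q == -R or q == R:
--             for r in range(-R, R + 1):
--                 edges.add((q, r))
--         elif q < 0:
--             edges.update([(q, -R), (q, -R - q), (q, R)])
--         elif q == 0:
--             edges.update([(q, -R), (q, R)])
--         else:
--             edges.update([(q, -R), (q, R - q), (q, R)])
--     return edges
-- ===== Notes on version B (the rewrite author's own statement) =====
-- stated objective: faster
-- what changed: Instead of scanning the whole (2R+1)x(2R+1) square and testing each cell for the boundary condition, B enumerates the boundary cells directly: the two full rows q=+-R, and for each interior q only the up-to-three cells on the lines r=-R, r=R, q+r=+-R.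
import Mathlib
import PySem

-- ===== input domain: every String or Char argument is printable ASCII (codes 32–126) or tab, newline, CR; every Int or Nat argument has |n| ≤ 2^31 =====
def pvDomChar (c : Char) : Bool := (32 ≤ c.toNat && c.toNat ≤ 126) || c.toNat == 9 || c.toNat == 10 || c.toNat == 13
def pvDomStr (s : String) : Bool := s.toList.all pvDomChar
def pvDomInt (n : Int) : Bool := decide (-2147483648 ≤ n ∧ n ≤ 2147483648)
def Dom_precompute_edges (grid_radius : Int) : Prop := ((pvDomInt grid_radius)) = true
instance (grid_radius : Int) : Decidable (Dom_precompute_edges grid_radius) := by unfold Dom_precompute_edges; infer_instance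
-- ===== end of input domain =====

-- B replaces A's O(R^2) scan of the whole square by a direct O(R) enumeration of the six boundary lines.

-- ===== PORT A =====
def precompute_edges (grid_radius : Int) : List (Int × Int) :=
  (PySem.List.pyRange (-grid_radius) (grid_radius + 1) 1).foldl (fun edges q =>
    (PySem.List.pyRange (-grid_radius) (grid_radius + 1) 1).foldl (fun edges r =>
      if q = -grid_radius ∨ q = grid_radius ∨ r = -grid_radius ∨ r = grid_radius ∨
         -q - r = -grid_radius ∨ -q - r = grid_radius
      then PySem.Set.add edges (q, r) else edges) edges)
    PySem.Set.empty

-- ===== PORT B =====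
def precompute_edges_alt (grid_radius : Int) : List (Int × Int) :=
  (PySem.List.pyRange (-grid_radius) (grid_radius + 1) 1).foldl (fun edges q =>
    if q = -grid_radius ∨ q = grid_radius then
      (PySem.List.pyRange (-grid_radius) (grid_radius + 1) 1).foldl
        (fun e r => PySem.Set.add e (q, r)) edges
    else if q < 0 then
      PySem.Set.update edges [(q, -grid_radius), (q, -grid_radius - q), (q, grid_radius)]
    else if q = 0 then
      PySem.Set.update edges [(q, -grid_radius), (q, grid_radius)]
    else
      PySem.Set.update edges [(q, -grid_radius), (q, grid_radius - q), (q, grid_radius)])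
    PySem.Set.empty

-- ===== PRECONDITION & SPEC =====
def Spec_precompute_edges (grid_radius : Int) (out : List (Int × Int)) : Prop := out = precompute_edges_alt grid_radius
instance (grid_radius : Int) (out : List (Int × Int)) : Decidable (Spec_precompute_edges grid_radius out) := by unfold Spec_precompute_edges; infer_instance

-- ===== CLAIM (what is proved, stated in full; the proofs are below) =====
def Claim_equal_precompute_edges : Prop := ∀ (grid_radius : Int), Dom_precompute_edges grid_radius → Spec_precompute_edges grid_radius (precompute_edges grid_radius)

-- ===== LEMMAS AND PROOFS =====

-- the cells A's inner loop contributes for a fixed q, in order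
def pvRowA (R q : Int) : List (Int × Int) :=
  ((PySem.List.pyRange (-R) (R + 1) 1).filter (fun r =>
      decide (q = -R ∨ q = R ∨ r = -R ∨ r = R ∨ -q - r = -R ∨ -q - r = R))).map
    (fun r => (q, r))

-- the cells B's step contributes for a fixed q, in order
def pvRowB (R q : Int) : List (Int × Int) :=
  if q = -R ∨ q = R then (PySem.List.pyRange (-R) (R + 1) 1).map (fun r => (q, r))
  else if q < 0 then [(q, -R), (q, -R - q), (q, R)]
  else if q = 0 then [(q, -R), (q, R)]
  else [(q, -R), (q, R - q), (q, R)]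

lemma pv_add_fresh {α : Type} [BEq α] [LawfulBEq α] (s : List α) (x : α) (h : x ∉ s) :
    PySem.Set.add s x = s ++ [x] := by
  simp [PySem.Set.add, h]

lemma pv_foldl_add_fresh {α : Type} [BEq α] [LawfulBEq α] (l : List α) (s : List α)
    (hnd : l.Nodup) (hs : ∀ x ∈ l, x ∉ s) :
    l.foldl PySem.Set.add s = s ++ l := by
  induction l generalizing s with
  | nil => simp
  | cons a t ih =>
    simp only [List.foldl_cons]
    have hfresh : ∀ x ∈ t, x ∉ s ++ [a] := by
      intro x hx
      simp only [List.mem_append, List.mem_singleton]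
      rintro (h' | rfl)
      · exact hs x (by simp [hx]) h'
      · exact (List.nodup_cons.mp hnd).1 hx
    rw [pv_add_fresh s a (hs a (by simp)), ih _ hnd.of_cons hfresh]
    simp

lemma pv_foldl_add_map_fresh (q : Int) (l : List Int) (s : List (Int × Int))
    (hnd : l.Nodup) (hs : ∀ x ∈ s, x.1 ≠ q) :
    l.foldl (fun e r => PySem.Set.add e (q, r)) s = s ++ l.map (fun r => (q, r)) := by
  have hmap : (l.map (fun r => (q, r))).foldl PySem.Set.add s
      = l.foldl (fun e r => PySem.Set.add e (q, r)) s := by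
    rw [List.foldl_map]
  rw [← hmap]
  apply pv_foldl_add_fresh
  · exact hnd.map (fun a b h => by injection h)
  · intro x hx h'
    obtain ⟨r, _, rfl⟩ := List.mem_map.mp hx
    exact hs _ h' rfl

lemma pv_innerA (R q : Int) (s : List (Int × Int)) (hs : ∀ x ∈ s, x.1 ≠ q) :
    (PySem.List.pyRange (-R) (R + 1) 1).foldl (fun e r =>
        if q = -R ∨ q = R ∨ r = -R ∨ r = R ∨ -q - r = -R ∨ -q - r = R
        then PySem.Set.add e (q, r) else e) s
      = s ++ pvRowA R q := by
  unfold pvRowA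
  rw [PySem.List.foldl_ite_eq_foldl_filter]
  exact pv_foldl_add_map_fresh q _ s ((PySem.List.nodup_pyRange_one _ _).filter _) hs

lemma pv_mem_rowA_fst (R q : Int) (x : Int × Int) (h : x ∈ pvRowA R q) : x.1 = q := by
  unfold pvRowA at h
  obtain ⟨r, _, rfl⟩ := List.mem_map.mp h
  rfl

lemma pv_mem_rowB_fst (R q : Int) (x : Int × Int) (h : x ∈ pvRowB R q) : x.1 = q := by
  unfold pvRowB at h
  split_ifs at h
  · obtain ⟨r, _, rfl⟩ := List.mem_map.mp h
    rfl
  all_goals simp only [List.mem_cons, List.not_mem_nil, or_false] at h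
  all_goals rcases h with rfl | rfl | rfl <;> rfl

lemma pv_outerA (R : Int) (lq : List Int) (s : List (Int × Int)) (hnd : lq.Nodup)
    (hs : ∀ x ∈ s, ∀ q ∈ lq, x.1 ≠ q) :
    lq.foldl (fun edges q =>
        (PySem.List.pyRange (-R) (R + 1) 1).foldl (fun edges r =>
          if q = -R ∨ q = R ∨ r = -R ∨ r = R ∨ -q - r = -R ∨ -q - r = R
          then PySem.Set.add edges (q, r) else edges) edges) s
      = s ++ lq.flatMap (pvRowA R) := by
  induction lq generalizing s with
  | nil => simp
  | cons q t ih =>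
    simp only [List.foldl_cons]
    have hfresh : ∀ x ∈ s ++ pvRowA R q, ∀ q' ∈ t, x.1 ≠ q' := by
      intro x hx q' hq'
      rcases List.mem_append.mp hx with h' | h'
      · exact hs x h' q' (by simp [hq'])
      · rw [pv_mem_rowA_fst R q x h']
        exact fun h'' => (List.nodup_cons.mp hnd).1 (h'' ▸ hq')
    rw [pv_innerA R q s (fun x hx => hs x hx q (by simp)),
      ih _ hnd.of_cons hfresh]
    simp

lemma pv_stepB (R q : Int) (s : List (Int × Int)) (hq1 : -R ≤ q) (hq2 : q ≤ R)
    (hs : ∀ x ∈ s, x.1 ≠ q) :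
    (if q = -R ∨ q = R then
      (PySem.List.pyRange (-R) (R + 1) 1).foldl (fun e r => PySem.Set.add e (q, r)) s
    else if q < 0 then PySem.Set.update s [(q, -R), (q, -R - q), (q, R)]
    else if q = 0 then PySem.Set.update s [(q, -R), (q, R)]
    else PySem.Set.update s [(q, -R), (q, R - q), (q, R)])
      = s ++ pvRowB R q := by
  unfold pvRowB
  split_ifs with h1 h2 h3
  · exact pv_foldl_add_map_fresh q _ s (PySem.List.nodup_pyRange_one _ _) hs
  · -- -R < q < 0, so 0 < R
    simp only [PySem.Set.update]
    apply pv_foldl_add_fresh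
    · push_neg at h1
      simp [Prod.ext_iff]
      omega
    · intro x hx
      have := pv_mem_rowB_fst R q x (by
        unfold pvRowB
        rw [if_neg h1, if_pos h2]
        exact hx)
      exact fun h' => hs x h' this
  · simp only [PySem.Set.update]
    apply pv_foldl_add_fresh
    · push_neg at h1
      simp [Prod.ext_iff]
      omega
    · intro x hx
      have := pv_mem_rowB_fst R q x (by
        unfold pvRowB
        rw [if_neg h1, if_neg h2, if_pos h3]
        exact hx)
      exact fun h' => hs x h' this
  · simp only [PySem.Set.update]
    apply pv_foldl_add_fresh
    · push_neg at h1
      simp [Prod.ext_iff]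
      omega
    · intro x hx
      have := pv_mem_rowB_fst R q x (by
        unfold pvRowB
        rw [if_neg h1, if_neg h2, if_neg h3]
        exact hx)
      exact fun h' => hs x h' this

lemma pv_outerB (R : Int) (lq : List Int) (s : List (Int × Int)) (hnd : lq.Nodup)
    (hb : ∀ q ∈ lq, -R ≤ q ∧ q ≤ R)
    (hs : ∀ x ∈ s, ∀ q ∈ lq, x.1 ≠ q) :
    lq.foldl (fun edges q =>
        if q = -R ∨ q = R then
          (PySem.List.pyRange (-R) (R + 1) 1).foldl (fun e r => PySem.Set.add e (q, r)) edges
        else if q < 0 then PySem.Set.update edges [(q, -R), (q, -R - q), (q, R)]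
        else if q = 0 then PySem.Set.update edges [(q, -R), (q, R)]
        else PySem.Set.update edges [(q, -R), (q, R - q), (q, R)]) s
      = s ++ lq.flatMap (pvRowB R) := by
  induction lq generalizing s with
  | nil => simp
  | cons q t ih =>
    simp only [List.foldl_cons]
    have hfresh : ∀ x ∈ s ++ pvRowB R q, ∀ q' ∈ t, x.1 ≠ q' := by
      intro x hx q' hq'
      rcases List.mem_append.mp hx with h' | h'
      · exact hs x h' q' (by simp [hq'])
      · rw [pv_mem_rowB_fst R q x h']
        exact fun h'' => (List.nodup_cons.mp hnd).1 (h'' ▸ hq')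
    rw [pv_stepB R q s (hb q (by simp)).1 (hb q (by simp)).2 (fun x hx => hs x hx q (by simp)),
      ih _ hnd.of_cons (fun q' hq' => hb q' (by simp [hq'])) hfresh]
    simp

lemma pv_eq_of_pairwise_lt (l₁ l₂ : List Int)
    (h₁ : l₁.Pairwise (· < ·)) (h₂ : l₂.Pairwise (· < ·))
    (hm : ∀ x, x ∈ l₁ ↔ x ∈ l₂) : l₁ = l₂ := by
  have n₁ : l₁.Nodup := h₁.imp (fun h => ne_of_lt h)
  have n₂ : l₂.Nodup := h₂.imp (fun h => ne_of_lt h)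
  have p : l₂.Perm l₁ := (List.perm_ext_iff_of_nodup n₂ n₁).mpr (fun x => (hm x).symm)
  have e1 := PySem.List.sorted_eq_of_perm_of_pairwise_lt l₁ l₁ (fun x => x) (List.Perm.refl l₁) h₁
  have e2 := PySem.List.sorted_eq_of_perm_of_pairwise_lt l₁ l₂ (fun x => x) p h₂
  rw [← e1, e2]

lemma pv_row_eq (R q : Int) (h1 : -R ≤ q) (h2 : q ≤ R) : pvRowA R q = pvRowB R q := by
  unfold pvRowA pvRowB
  by_cases hedge : q = -R ∨ q = R
  · rw [if_pos hedge]
    congr 1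
    apply List.filter_eq_self.mpr
    intro r _
    simp only [decide_eq_true_iff]
    tauto
  · rw [if_neg hedge]
    push_neg at hedge
    -- -R < q < R, hence 0 < R
    have hR : 0 < R := by omega
    by_cases hneg : q < 0
    · rw [if_pos hneg]
      have : (PySem.List.pyRange (-R) (R + 1) 1).filter (fun r =>
          decide (q = -R ∨ q = R ∨ r = -R ∨ r = R ∨ -q - r = -R ∨ -q - r = R))
          = [-R, -R - q, R] := by
        apply pv_eq_of_pairwise_lt
        · exact (PySem.List.pairwise_lt_pyRange_one _ _).filter _
        · simp
          omega
        · intro x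
          simp only [List.mem_filter, PySem.List.mem_pyRange_one, decide_eq_true_iff,
            List.mem_cons, List.not_mem_nil, or_false]
          omega
      rw [this]
      rfl
    · rw [if_neg hneg]
      by_cases hzero : q = 0
      · rw [if_pos hzero]
        subst hzero
        have : (PySem.List.pyRange (-R) (R + 1) 1).filter (fun r =>
            decide ((0:Int) = -R ∨ (0:Int) = R ∨ r = -R ∨ r = R ∨ -(0:Int) - r = -R ∨ -(0:Int) - r = R))
            = [-R, R] := by
          apply pv_eq_of_pairwise_lt
          · exact (PySem.List.pairwise_lt_pyRange_one _ _).filter _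
          · simp
            omega
          · intro x
            simp only [List.mem_filter, PySem.List.mem_pyRange_one, decide_eq_true_iff,
              List.mem_cons, List.not_mem_nil, or_false]
            omega
        rw [this]
        rfl
      · rw [if_neg hzero]
        have : (PySem.List.pyRange (-R) (R + 1) 1).filter (fun r =>
            decide (q = -R ∨ q = R ∨ r = -R ∨ r = R ∨ -q - r = -R ∨ -q - r = R))
            = [-R, R - q, R] := by
          apply pv_eq_of_pairwise_lt
          · exact (PySem.List.pairwise_lt_pyRange_one _ _).filter _
          · simp
            omega
          · intro x
            simp only [List.mem_filter, PySem.List.mem_pyRange_one, decide_eq_true_iff,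
              List.mem_cons, List.not_mem_nil, or_false]
            omega
        rw [this]
        rfl

lemma pv_flatMap_rows (R : Int) (l : List Int) (hb : ∀ q ∈ l, -R ≤ q ∧ q ≤ R) :
    l.flatMap (pvRowA R) = l.flatMap (pvRowB R) := by
  induction l with
  | nil => rfl
  | cons q t ih =>
    simp only [List.flatMap_cons]
    rw [pv_row_eq R q (hb q (by simp)).1 (hb q (by simp)).2,
      ih (fun q' hq' => hb q' (by simp [hq']))]

-- ===== VERDICT (by name: the statement is the Claim_ definition above) =====
theorem precompute_edges_spec : Claim_equal_precompute_edges := by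
  intro R _
  unfold Spec_precompute_edges precompute_edges precompute_edges_alt
  rw [pv_outerA R _ PySem.Set.empty (PySem.List.nodup_pyRange_one _ _)
      (by intro x hx; simp [PySem.Set.empty] at hx)]
  rw [pv_outerB R _ PySem.Set.empty (PySem.List.nodup_pyRange_one _ _)
      (by intro q hq; rw [PySem.List.mem_pyRange_one] at hq; omega)
      (by intro x hx; simp [PySem.Set.empty] at hx)]
  simp only [PySem.Set.empty, List.nil_append]
  exact pv_flatMap_rows R _ (by intro q hq; rw [PySem.List.mem_pyRange_one] at hq; omega)
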